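-- pv_equiv track=rewrite | github.com/kr4g/Klotho | tests/test_graph_derived_regression.py | _expected_edges
-- ===== SOURCE A (Python) =====
-- from functools import reduce
-- from operator import mul
--
-- def _prod(values):
--     return reduce(mul, values, 1)
--
-- def _expected_edges(dims, periodic):
--     lengths = [len(d) for d in dims]
--     total = 0
--     for i, axis_len in enumerate(lengths):
--         others = _prod(lengths[:i] + lengths[i + 1 :])
--         if periodic:
--             total += axis_len * others
--         else:
--             total += (axis_len - 1) * others
--     return total
-- ===== SOURCE B (Python) =====
-- def _expected_edges(dims, periodic):
--     # O(n): suffix products built once (backward pass), prefix product carried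
--     # forward, so "product of the other axes" is prefix * suffix in O(1).
--     lengths = [len(d) for d in dims]
--     suffix = [1]
--     for L in reversed(lengths):
--         suffix.append(L * suffix[-1])
--     suffix.reverse()
--     total = 0
--     prefix = 1
--     for L, suf in zip(lengths, suffix[1:]):
--         total += (L if periodic else L - 1) * (prefix * suf)
--         prefix *= L
--     return total
-- ===== Notes on version B (the rewrite author's own statement) =====
-- stated objective: faster
-- what changed: Replaces the per-axis recomputation of the product of all other axis lengths (a full reduce over a rebuilt list for every axis) with one backward pass building suffix products and one forward pass carrying a prefix product, so each 'product of the others' is prefix*suffix in O(1).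
import Mathlib
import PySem

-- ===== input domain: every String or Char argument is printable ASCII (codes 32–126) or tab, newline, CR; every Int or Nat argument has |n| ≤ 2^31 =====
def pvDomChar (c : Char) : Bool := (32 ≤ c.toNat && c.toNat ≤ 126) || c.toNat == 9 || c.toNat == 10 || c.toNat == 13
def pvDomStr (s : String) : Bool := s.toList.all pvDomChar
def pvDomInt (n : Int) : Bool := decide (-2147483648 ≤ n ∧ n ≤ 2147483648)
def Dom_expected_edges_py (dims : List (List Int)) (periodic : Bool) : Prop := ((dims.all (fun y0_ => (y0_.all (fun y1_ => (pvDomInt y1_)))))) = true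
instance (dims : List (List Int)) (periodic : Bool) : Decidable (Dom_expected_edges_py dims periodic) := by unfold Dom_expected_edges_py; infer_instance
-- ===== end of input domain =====

-- B replaces A's per-axis product over a rebuilt list (O(n^2)) with a
-- suffix-products pass plus a running prefix product (O(n)); same value everywhere.

-- ===== PORT A =====
-- _prod(values) = reduce(mul, values, 1)
def pvProd (values : List Int) : Int := values.foldl (· * ·) 1

def expected_edges_py (dims : List (List Int)) (periodic : Bool) : Int :=
  let lengths := dims.map (fun d => (d.length : Int))
  (PySem.List.enumerate lengths 0).foldl
    (fun total p =>
      let others := pvProd (PySem.List.slice lengths none (some p.1) ++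
                            PySem.List.slice lengths (some (p.1 + 1)) none)
      if periodic then total + p.2 * others else total + (p.2 - 1) * others)
    0

-- ===== PORT B =====
def expected_edges_py_alt (dims : List (List Int)) (periodic : Bool) : Int :=
  let lengths := dims.map (fun d => (d.length : Int))
  -- backward pass over lengths building the suffix-product list (Source B's reversed loop)
  let suffix := lengths.foldr (fun L acc => (L * acc.headD 1) :: acc) [1]
  -- forward pass: carry (prefix, total) over zip(lengths, suffix[1:])
  let st := (lengths.zip suffix.tail).foldl
    (fun (st : Int × Int) (q : Int × Int) =>
      (st.1 * q.1, st.2 + (if periodic then q.1 else q.1 - 1) * (st.1 * q.2)))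
    (1, 0)
  st.2

-- ===== PRECONDITION & SPEC =====
def Spec_expected_edges_py (dims : List (List Int)) (periodic : Bool) (out : Int) : Prop := out = expected_edges_py_alt dims periodic
instance (dims : List (List Int)) (periodic : Bool) (out : Int) : Decidable (Spec_expected_edges_py dims periodic out) := by unfold Spec_expected_edges_py; infer_instance

-- ===== CLAIM (what is proved, stated in full; the proofs are below) =====
def Claim_equal_expected_edges_py : Prop := ∀ (dims : List (List Int)) (periodic : Bool), Dom_expected_edges_py dims periodic → Spec_expected_edges_py dims periodic (expected_edges_py dims periodic)

-- ===== LEMMAS AND PROOFS =====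

-- common mathematical form of both programs
def edgeSpec (periodic : Bool) : List Int → Int
  | [] => 0
  | L :: ls => (if periodic then L else L - 1) * ls.prod + L * edgeSpec periodic ls

theorem pvProd_eq_prod_aux (ls : List Int) : ∀ (a : Int), ls.foldl (· * ·) a = a * ls.prod := by
  induction ls with
  | nil => intro a; simp
  | cons x xs ih => intro a; simp [List.foldl, ih, List.prod_cons]; ring

theorem pvProd_eq_prod (ls : List Int) : pvProd ls = ls.prod := by
  simpa using pvProd_eq_prod_aux ls 1

-- A's fold, generalized over the already-consumed prefix
theorem A_key (periodic : Bool) (ls : List Int) : ∀ (pre : List Int) (t : Int),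
    (PySem.List.enumerate ls (pre.length : Int)).foldl
      (fun total p =>
        let others := pvProd (PySem.List.slice (pre ++ ls) none (some p.1) ++
                              PySem.List.slice (pre ++ ls) (some (p.1 + 1)) none)
        if periodic then total + p.2 * others else total + (p.2 - 1) * others)
      t
    = t + pre.prod * edgeSpec periodic ls := by
  induction ls with
  | nil => intro pre t; simp [PySem.List.enumerate, edgeSpec]
  | cons L ls ih =>
    intro pre t
    rw [PySem.List.enumerate_cons]
    simp only [List.foldl_cons]
    have h1 : PySem.List.slice (pre ++ L :: ls) none (some (pre.length : Int)) = pre := by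
      rw [PySem.List.slice_to_natCast]; exact List.take_left
    have h2 : PySem.List.slice (pre ++ L :: ls) (some ((pre.length : Int) + 1)) none = ls := by
      have : ((pre.length : Int) + 1) = ((pre.length + 1 : Nat) : Int) := by push_cast; ring
      rw [this, PySem.List.slice_from_natCast]
      have : pre ++ L :: ls = (pre ++ [L]) ++ ls := by simp
      rw [this]
      exact List.drop_left' (by simp)
    have h3 : ((pre.length : Int) + 1) = (((pre ++ [L]).length : Nat) : Int) := by
      simp
    rw [h1, h2]
    have hls : pre ++ L :: ls = (pre ++ [L]) ++ ls := by simp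
    rw [hls, h3, ih (pre ++ [L])]
    simp only [edgeSpec, pvProd_eq_prod, List.prod_append, List.prod_cons, List.prod_nil]
    split <;> ring

-- B's suffix list: head is the product of the remaining lengths
def sfxBuild (ls : List Int) : List Int := ls.foldr (fun L acc => (L * acc.headD 1) :: acc) [1]

theorem sfx_head (ls : List Int) : (sfxBuild ls).headD 1 = ls.prod := by
  induction ls with
  | nil => simp [sfxBuild]
  | cons L ls ih =>
    have h : sfxBuild (L :: ls) = (L * (sfxBuild ls).headD 1) :: sfxBuild ls := rfl
    rw [h, List.headD_cons, ih, List.prod_cons]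

theorem sfx_ne_nil (ls : List Int) : sfxBuild ls ≠ [] := by
  cases ls <;> simp [sfxBuild]

-- B's forward fold, generalized over the carried prefix product
theorem B_key (periodic : Bool) (ls : List Int) : ∀ (pr t : Int),
    ((ls.zip (sfxBuild ls).tail).foldl
      (fun (st : Int × Int) (q : Int × Int) =>
        (st.1 * q.1, st.2 + (if periodic then q.1 else q.1 - 1) * (st.1 * q.2)))
      (pr, t)).2
    = t + pr * edgeSpec periodic ls := by
  induction ls with
  | nil => intro pr t; simp [sfxBuild, edgeSpec]
  | cons L ls ih =>
    intro pr t
    have htail : (sfxBuild (L :: ls)).tail = sfxBuild ls := by simp [sfxBuild]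
    rw [htail]
    rcases hs : sfxBuild ls with _ | ⟨hd, tl⟩
    · exact absurd hs (sfx_ne_nil ls)
    · have hhd : hd = ls.prod := by
        have h := sfx_head ls; rw [hs] at h; simpa using h
      simp only [List.zip_cons_cons, List.foldl_cons]
      have ihx := ih (pr * L) (t + (if periodic then L else L - 1) * (pr * hd))
      rw [hs] at ihx
      simp only [List.tail_cons] at ihx
      rw [ihx]
      subst hhd
      simp only [edgeSpec]
      split <;> ring

theorem both_eq_spec (dims : List (List Int)) (periodic : Bool) :
    expected_edges_py dims periodic = expected_edges_py_alt dims periodic := by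
  unfold expected_edges_py expected_edges_py_alt
  have hA := A_key periodic (dims.map (fun d => (d.length : Int))) [] 0
  simp only [List.length_nil, Nat.cast_zero, List.nil_append, List.prod_nil, one_mul,
    zero_add] at hA
  have hB := B_key periodic (dims.map (fun d => (d.length : Int))) 1 0
  simp only [zero_add, one_mul] at hB
  rw [hA]
  exact hB.symm

-- ===== VERDICT (by name: the statement is the Claim_ definition above) =====
theorem expected_edges_py_spec : Claim_equal_expected_edges_py := by
  intro dims periodic _
  unfold Spec_expected_edges_py
  exact both_eq_spec dims periodic
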